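-- pv_equiv track=rewrite | github.com/atOliverParkerMorgan/Bachelor-Thesis | src/preprocessing/utils/split_nnunet_volumes.py | get_split_ranges
-- ===== SOURCE A (Python) =====
-- def get_split_ranges(total, n_splits, overlap):
--     """
--     Compute split boundaries for a 1D axis length.
--
--     Returns list of (start_idx, end_idx).
--     """
--     base_size = total // n_splits
--     remainder = total % n_splits
--
--     ranges = []
--     pos = 0
--     for i in range(n_splits):
--         # Distribute remainder slices to first chunks
--         chunk_size = base_size + (1 if i < remainder else 0)
--         start = max(0, pos - overlap)
--         end = min(total, pos + chunk_size + overlap)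
--         ranges.append((start, end))
--         pos += chunk_size
--
--     return ranges
-- ===== SOURCE B (Python) =====
-- def get_split_ranges(total, n_splits, overlap):
--     """
--     Compute split boundaries for a 1D axis length.
--
--     Returns list of (start_idx, end_idx).
--     """
--     base = total // n_splits
--     rem = total % n_splits
--     # closed-form cumulative boundaries: position after i chunks
--     bounds = [i * base + min(i, rem) for i in range(n_splits + 1)]
--     return [(max(0, s - overlap), min(total, e + overlap))
--             for s, e in zip(bounds, bounds[1:])]
-- ===== Notes on version B (the rewrite author's own statement) =====
-- stated objective: simpler
-- what changed: Replaces the running position accumulator and per-iteration chunk-size computation by a closed-form list of cumulative boundaries (i*base + min(i, rem)) zipped with its own tail.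
import Mathlib
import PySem

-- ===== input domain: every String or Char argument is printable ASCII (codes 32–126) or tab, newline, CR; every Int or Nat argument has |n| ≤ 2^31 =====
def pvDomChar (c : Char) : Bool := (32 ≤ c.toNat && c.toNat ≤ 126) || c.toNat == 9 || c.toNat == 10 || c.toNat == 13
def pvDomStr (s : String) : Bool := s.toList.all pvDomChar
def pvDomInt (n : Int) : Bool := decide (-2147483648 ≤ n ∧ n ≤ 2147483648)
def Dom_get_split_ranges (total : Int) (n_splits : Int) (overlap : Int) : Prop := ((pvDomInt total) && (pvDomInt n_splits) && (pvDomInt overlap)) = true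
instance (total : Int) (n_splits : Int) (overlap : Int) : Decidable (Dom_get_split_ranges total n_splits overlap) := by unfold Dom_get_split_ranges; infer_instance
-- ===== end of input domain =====

-- B derives each range from closed-form cumulative boundaries instead of a running
-- position accumulator; objective: simpler (same O(n_splits) cost).

-- ===== PORT A =====
def get_split_ranges (total : Int) (n_splits : Int) (overlap : Int) : List (Int × Int) :=
  let base := PySem.Int.floordiv total n_splits
  let rem := PySem.Int.mod total n_splits
  ((PySem.List.pyRange 0 n_splits 1).foldl
    (fun (st : List (Int × Int) × Int) i =>
      let chunk := base + (if i < rem then (1 : Int) else 0)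
      (st.1 ++ [(max 0 (st.2 - overlap), min total (st.2 + chunk + overlap))], st.2 + chunk))
    ([], 0)).1

-- ===== PORT B =====
def get_split_ranges_alt (total : Int) (n_splits : Int) (overlap : Int) : List (Int × Int) :=
  let base := PySem.Int.floordiv total n_splits
  let rem := PySem.Int.mod total n_splits
  let bounds := (PySem.List.pyRange 0 (n_splits + 1) 1).map (fun i => i * base + min i rem)
  (bounds.zip (PySem.List.slice bounds (some 1) none)).map
    (fun p => (max 0 (p.1 - overlap), min total (p.2 + overlap)))

-- ===== PRECONDITION & SPEC =====
-- Python raises ZeroDivisionError at 'total // n_splits' when n_splits == 0.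
def Pre_get_split_ranges (total : Int) (n_splits : Int) (overlap : Int) : Prop := n_splits ≠ 0
instance (total : Int) (n_splits : Int) (overlap : Int) : Decidable (Pre_get_split_ranges total n_splits overlap) := by unfold Pre_get_split_ranges; infer_instance
def pvWitness_get_split_ranges : Int × Int × Int := (10, 3, 1)

def Spec_get_split_ranges (total : Int) (n_splits : Int) (overlap : Int) (out : List (Int × Int)) : Prop := out = get_split_ranges_alt total n_splits overlap
instance (total : Int) (n_splits : Int) (overlap : Int) (out : List (Int × Int)) : Decidable (Spec_get_split_ranges total n_splits overlap out) := by unfold Spec_get_split_ranges; infer_instance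

-- ===== CLAIM (what is proved, stated in full; the proofs are below) =====
def Claim_equal_get_split_ranges : Prop := ∀ (total : Int) (n_splits : Int) (overlap : Int), Dom_get_split_ranges total n_splits overlap → Pre_get_split_ranges total n_splits overlap → Spec_get_split_ranges total n_splits overlap (get_split_ranges total n_splits overlap)

-- ===== LEMMAS AND PROOFS =====

-- zipping a mapped range with its shifted-by-one version gives consecutive pairs
lemma zip_range_shift {β : Type} (n : Nat) (f : Nat → β) :
    ((List.range (n + 1)).map f).zip ((List.range n).map (fun k => f (k + 1)))
      = (List.range n).map (fun k => (f k, f (k + 1))) := by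
  apply List.ext_getElem
  · simp
  · intro k h1 h2
    simp only [List.getElem_zip, List.getElem_map, List.getElem_range]

-- A's loop: after n iterations the position is n*base + min n rem and the
-- accumulated list is the closed-form list of ranges
lemma loopA (base rem overlap total : Int) (hrem : 0 ≤ rem) : ∀ (n : Nat),
    (((List.range n).map (fun k => Int.ofNat k)).foldl
        (fun (st : List (Int × Int) × Int) i =>
          let chunk := base + (if i < rem then (1 : Int) else 0)
          (st.1 ++ [(max 0 (st.2 - overlap), min total (st.2 + chunk + overlap))], st.2 + chunk))
        ([], 0))
      = ((List.range n).map (fun k =>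
            (max 0 ((Int.ofNat k) * base + min (Int.ofNat k) rem - overlap),
             min total (((Int.ofNat k) + 1) * base + min ((Int.ofNat k) + 1) rem + overlap))),
         (Int.ofNat n) * base + min (Int.ofNat n) rem) := by
  intro n
  induction n with
  | zero => simp; omega
  | succ m ih =>
    rw [List.range_succ, List.map_append, List.foldl_append, ih]
    rw [List.map_append]
    simp only [List.map_cons, List.map_nil, List.foldl_cons, List.foldl_nil]
    have hstep : (Int.ofNat m) * base + min (Int.ofNat m) rem + (base + (if (Int.ofNat m) < rem then (1 : Int) else 0))
        = (Int.ofNat (m + 1)) * base + min (Int.ofNat (m + 1)) rem := by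
      simp only [Int.ofNat_eq_natCast]
      split_ifs with h <;> push_cast <;> ring_nf <;> omega
    simp only [Prod.mk.injEq]
    have hsucc : Int.ofNat (m + 1) = Int.ofNat m + 1 := by
      simp [Int.ofNat_eq_natCast]
    constructor
    · rw [hstep, hsucc]
    · rw [hstep, hsucc]

-- ===== VERDICT (by name: the statement is the Claim_ definition above) =====
theorem get_split_ranges_spec : Claim_equal_get_split_ranges := by
  intro total n_splits overlap _ hpre
  unfold Spec_get_split_ranges get_split_ranges get_split_ranges_alt
  by_cases hpos : 0 < n_splits
  · -- positive case
    have hrem : 0 ≤ PySem.Int.mod total n_splits := by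
      rw [PySem.Int.mod_eq_emod_of_pos hpos]
      exact Int.emod_nonneg total (by omega)
    set base := PySem.Int.floordiv total n_splits with hbase
    set rem := PySem.Int.mod total n_splits with hrm
    have hr1 : PySem.List.pyRange 0 n_splits 1
        = (List.range n_splits.toNat).map (fun k => Int.ofNat k) := by
      rw [PySem.List.pyRange_one]
      simp [Int.ofNat_eq_natCast]
    have hr2 : PySem.List.pyRange 0 (n_splits + 1) 1
        = (List.range (n_splits.toNat + 1)).map (fun k => Int.ofNat k) := by
      rw [PySem.List.pyRange_one]
      have : (n_splits + 1 - 0).toNat = n_splits.toNat + 1 := by omega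
      rw [this]
      simp [Int.ofNat_eq_natCast]
    simp only [hr1, hr2]
    rw [loopA base rem overlap total hrem n_splits.toNat]
    rw [List.map_map, PySem.List.slice_from_one]
    have htail : (((List.range (n_splits.toNat + 1)).map
          ((fun i => i * base + min i rem) ∘ fun k => Int.ofNat k))).tail
        = (List.range n_splits.toNat).map
            (fun k => ((fun i => i * base + min i rem) ∘ fun j => Int.ofNat j) (k + 1)) := by
      rw [List.range_succ_eq_map (n := n_splits.toNat)]
      simp [Function.comp_def]
    rw [htail, zip_range_shift n_splits.toNat
      ((fun i => i * base + min i rem) ∘ fun k => Int.ofNat k)]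
    rw [List.map_map]
    apply List.map_congr_left
    intro k _
    simp only [Function.comp_def, Int.ofNat_eq_natCast]
    push_cast
    ring_nf
  · -- n_splits < 0 (n_splits ≠ 0): both loops are empty
    have hne : n_splits ≠ 0 := hpre
    rw [PySem.List.pyRange_one_eq_nil (by omega : n_splits ≤ (0:Int)),
        PySem.List.pyRange_one_eq_nil (by omega : n_splits + 1 ≤ (0:Int))]
    simp
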